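-- pv_equiv track=rewrite | github.com/U70-TK/bpetokenizer_prototype | core.py | _try_newline_ws
-- ===== SOURCE A (Python) =====
-- def is_space(b):
--     """True iff b is ASCII whitespace: space, \\t, \\n, \\r, \\x0b, \\x0c."""
--     return b in (9, 10, 11, 12, 13, 32)
--
-- def is_newline(b):
--     """True iff b is \\n or \\r."""
--     return b == 10 or b == 13
--
-- def _try_newline_ws(data, pos):
--     """
--     Branch 5: match \\s*[\\r\\n] at pos.
--     Zero or more whitespace (including newlines), ending with a newline.
--     Returns number of bytes consumed, or 0 if no match.
--
--     The regex \\s*[\\r\\n] is greedy: \\s* eats as much whitespace as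
--     possible (including \\r and \\n), then [\\r\\n] must match.
--     With backtracking: find the rightmost newline in the contiguous
--     whitespace block starting at pos.
--     """
--     # find the end of the contiguous whitespace block
--     i = pos
--     while i < len(data) and is_space(data[i]):
--         i += 1
--     # scan backwards for the last newline in the block
--     # \s*[\r\n] is greedy, so \s* eats everything it can,
--     # then [\r\n] needs one newline. If the last ws char is a newline,
--     # great. Otherwise backtrack.
--     j = i - 1
--     while j >= pos and not is_newline(data[j]):
--         j -= 1
--     if j >= pos and is_newline(data[j]):
--         return (j + 1) - pos
--     return 0
-- ===== SOURCE B (Python) =====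
-- def is_space(b):
--     """True iff b is ASCII whitespace: space, \t, \n, \r, \x0b, \x0c."""
--     return b in (9, 10, 11, 12, 13, 32)
--
-- def is_newline(b):
--     """True iff b is \n or \r."""
--     return b == 10 or b == 13
--
-- def _try_newline_ws(data, pos):
--     """Single forward pass: remember the last newline seen while eating
--     whitespace; no separate backward backtracking scan."""
--     i = pos
--     last_nl = None
--     while i < len(data) and is_space(data[i]):
--         if is_newline(data[i]):
--             last_nl = i
--         i += 1
--     if last_nl is None:
--         return 0
--     return last_nl + 1 - pos
-- ===== Notes on version B (the rewrite author's own statement) =====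
-- stated objective: simpler
-- what changed: B does one forward scan that remembers the index of the last newline seen, instead of A's forward scan followed by a second backward backtracking scan.
import Mathlib
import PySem

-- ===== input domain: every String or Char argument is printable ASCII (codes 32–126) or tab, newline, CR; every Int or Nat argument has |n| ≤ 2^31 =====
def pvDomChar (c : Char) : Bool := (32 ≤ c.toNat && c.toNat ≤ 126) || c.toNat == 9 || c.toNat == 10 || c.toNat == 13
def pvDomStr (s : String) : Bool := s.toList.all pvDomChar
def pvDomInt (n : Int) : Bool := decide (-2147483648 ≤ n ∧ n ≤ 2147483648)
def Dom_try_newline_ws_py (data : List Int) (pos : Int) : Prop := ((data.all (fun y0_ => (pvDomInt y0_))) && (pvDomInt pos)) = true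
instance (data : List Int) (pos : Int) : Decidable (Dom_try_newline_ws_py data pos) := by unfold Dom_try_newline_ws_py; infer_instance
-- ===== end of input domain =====

-- B replaces A's forward-scan-then-backward-backtrack with ONE forward scan that
-- remembers the last newline index (objective: simpler).

-- ===== PORT A =====
-- is_space(b)
def pvIsSpace (b : Int) : Bool := b == 9 || b == 10 || b == 11 || b == 12 || b == 13 || b == 32
-- is_newline(b)
def pvIsNewline (b : Int) : Bool := b == 10 || b == 13

-- is_newline(data[j]) where data[j] may be out of range (none = IndexError, excluded by Pre_; treated as "not newline")
def pvIsNLAt (data : List Int) (j : Int) : Bool :=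
  match PySem.List.pyGet? data j with
  | some v => pvIsNewline v
  | none => false

-- A's first loop: while i < len(data) and is_space(data[i]): i += 1 ; returns final i
def pvAScan (data : List Int) (i : Int) : Int :=
  if _h : i < (data.length : Int) then
    match PySem.List.pyGet? data i with
    | some v => if pvIsSpace v then pvAScan data (i + 1) else i
    | none => i    -- data[i] raises IndexError in Python; excluded by Pre_
  else i
termination_by ((data.length : Int) - i).toNat
decreasing_by omega

-- A's second loop: while j >= pos and not is_newline(data[j]): j -= 1 ; returns final j
def pvABack (data : List Int) (pos j : Int) : Int :=
  if h : pos ≤ j then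
    if pvIsNLAt data j then j else pvABack data pos (j - 1)
  else j
termination_by (j - pos + 1).toNat
decreasing_by omega

def try_newline_ws_py (data : List Int) (pos : Int) : Int :=
  let i := pvAScan data pos
  let j := pvABack data pos (i - 1)
  if pos ≤ j ∧ pvIsNLAt data j = true then (j + 1) - pos else 0

-- ===== PORT B =====
-- B's single loop: eat whitespace forward, remembering the last newline index in last_nl
def pvBScan (data : List Int) (i : Int) (last : Option Int) : Option Int :=
  if _h : i < (data.length : Int) then
    match PySem.List.pyGet? data i with
    | some v =>
        if pvIsSpace v then pvBScan data (i + 1) (if pvIsNewline v then some i else last)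
        else last
    | none => last    -- data[i] raises IndexError in Python; excluded by Pre_
  else last
termination_by ((data.length : Int) - i).toNat
decreasing_by omega

def try_newline_ws_py_alt (data : List Int) (pos : Int) : Int :=
  match pvBScan data pos none with
  | some k => k + 1 - pos
  | none => 0

-- ===== PRECONDITION & SPEC =====
-- Pre_ excludes exactly pos < -len(data), where both Pythons raise IndexError
-- on the first access data[pos] (negative index past the front of the list).
def Pre_try_newline_ws_py (data : List Int) (pos : Int) : Prop := -(data.length : Int) ≤ pos
instance (data : List Int) (pos : Int) : Decidable (Pre_try_newline_ws_py data pos) := by unfold Pre_try_newline_ws_py; infer_instance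

def pvWitness_try_newline_ws_py : List Int × Int := ([32, 10, 32], 0)

def Spec_try_newline_ws_py (data : List Int) (pos : Int) (out : Int) : Prop := out = try_newline_ws_py_alt data pos
instance (data : List Int) (pos : Int) (out : Int) : Decidable (Spec_try_newline_ws_py data pos out) := by unfold Spec_try_newline_ws_py; infer_instance

-- ===== CLAIM (what is proved, stated in full; the proofs are below) =====
def Claim_equal_try_newline_ws_py : Prop := ∀ (data : List Int) (pos : Int), Dom_try_newline_ws_py data pos → Pre_try_newline_ws_py data pos → Spec_try_newline_ws_py data pos (try_newline_ws_py data pos)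

-- ===== LEMMAS AND PROOFS =====

-- "last newline found so far" as an Option: the result of A's backward scan from s, if it found one
def pvOptBack (data : List Int) (pos s : Int) : Option Int :=
  let j := pvABack data pos s
  if pos ≤ j then some j else none

-- if the backward scan stops at j ≥ pos, it stopped on a newline
theorem pvABack_stops_on_nl (data : List Int) (pos : Int) : ∀ s, pos ≤ pvABack data pos s → pvIsNLAt data (pvABack data pos s) = true := by
  intro s
  induction s using pvABack.induct data pos with
  | case1 s h hnl =>
      intro _
      rw [pvABack, dif_pos h, if_pos hnl]
      exact hnl
  | case2 s h hnl ih =>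
      rw [pvABack, dif_pos h, if_neg hnl]
      exact ih
  | case3 s h =>
      intro hle
      rw [pvABack, dif_neg h] at hle
      omega

-- invariant: if last encodes the last newline in [pos, i), the forward B-scan from i
-- returns the last newline in [pos, pvAScan data i)
theorem pvBScan_eq_optBack (data : List Int) (pos : Int) :
    ∀ i last, pos ≤ i → -(data.length : Int) ≤ pos →
      last = pvOptBack data pos (i - 1) →
      pvBScan data i last = pvOptBack data pos (pvAScan data i - 1) := by
  intro i last
  induction i, last using pvBScan.induct data with
  | case1 i last h v hv hsp ih =>
      -- space at i: one step of both scans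
      intro hpi hpre hlast
      rw [pvBScan, pvAScan]
      simp only [h, dif_pos, hv, hsp, if_pos]
      apply ih (by omega) hpre
      -- (if is_newline data[i] then some i else last) = pvOptBack data pos i
      have harith : i + 1 - 1 = i := by omega
      rw [harith]
      have hnl : pvIsNLAt data i = pvIsNewline v := by simp [pvIsNLAt, hv]
      by_cases hn : pvIsNewline v = true
      · unfold pvOptBack
        rw [pvABack]
        simp [hpi, hnl, hn]
      · simp only [Bool.not_eq_true] at hn
        have hf : pvIsNLAt data i = false := by rw [hnl, hn]
        simp only [hn, Bool.false_eq_true]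
        unfold pvOptBack
        rw [pvABack]
        simp only [hpi, dif_pos, hf, Bool.false_eq_true, if_false]
        rw [hlast]
        rfl
  | case2 i last h v hv hsp =>
      -- non-space at i: both scans stop
      intro hpi hpre hlast
      rw [pvBScan, pvAScan]
      simp only [h, dif_pos, hv, hsp, Bool.false_eq_true, if_false]
      exact hlast
  | case3 i last h hv =>
      -- IndexError branch (unreachable under Pre_, but the ports agree here too)
      intro hpi hpre hlast
      exfalso
      rw [PySem.List.pyGet?_eq_none_iff] at hv
      exact hv (by unfold PySem.Raise.InRange; omega)
  | case4 i last h =>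
      intro hpi hpre hlast
      rw [pvBScan, pvAScan]
      simp only [h, dif_neg, not_false_iff]
      exact hlast

theorem try_newline_ws_py_spec : Claim_equal_try_newline_ws_py := by
  intro data pos _hdom hpre
  unfold Spec_try_newline_ws_py try_newline_ws_py try_newline_ws_py_alt
  have hb := pvBScan_eq_optBack data pos pos none le_rfl hpre ?init
  case init =>
    unfold pvOptBack
    rw [pvABack]
    simp [show ¬ pos ≤ pos - 1 by omega]
  rw [hb]
  unfold pvOptBack
  by_cases hle : pos ≤ pvABack data pos (pvAScan data pos - 1)
  · have hnl := pvABack_stops_on_nl data pos (pvAScan data pos - 1) hle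
    simp [hle, hnl]
  · simp [hle]
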